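-- pv_equiv track=rewrite | github.com/needleworm/wordpuzzle | from_dictionary.py | investigate_letter
-- ===== SOURCE A (Python) =====
-- def investigate_letter(line, dictionary):
--     for letter in line:
--         if letter == '-':
--             continue
--         if letter not in dictionary:
--             return False
--         elif line.count(letter) > dictionary[letter]:
--             return False
--     return True
-- ===== SOURCE B (Python) =====
-- def investigate_letter(line, dictionary):
--     s = sorted(line)
--     n = len(s)
--     i = 0
--     while i < n:
--         j = i
--         while j < n and s[j] == s[i]:
--             j += 1
--         ch = s[i]
--         if ch != '-':
--             if ch not in dictionary or j - i > dictionary[ch]: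
--                 return False
--         i = j
--     return True
-- ===== Notes on version B (the rewrite author's own statement) =====
-- stated objective: alternative
-- what changed: B sorts the line's characters once and scans the maximal runs of equal characters, testing each run's length against the budget, instead of A's per-character loop that rescans the whole line with line.count at every character.
import Mathlib
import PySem

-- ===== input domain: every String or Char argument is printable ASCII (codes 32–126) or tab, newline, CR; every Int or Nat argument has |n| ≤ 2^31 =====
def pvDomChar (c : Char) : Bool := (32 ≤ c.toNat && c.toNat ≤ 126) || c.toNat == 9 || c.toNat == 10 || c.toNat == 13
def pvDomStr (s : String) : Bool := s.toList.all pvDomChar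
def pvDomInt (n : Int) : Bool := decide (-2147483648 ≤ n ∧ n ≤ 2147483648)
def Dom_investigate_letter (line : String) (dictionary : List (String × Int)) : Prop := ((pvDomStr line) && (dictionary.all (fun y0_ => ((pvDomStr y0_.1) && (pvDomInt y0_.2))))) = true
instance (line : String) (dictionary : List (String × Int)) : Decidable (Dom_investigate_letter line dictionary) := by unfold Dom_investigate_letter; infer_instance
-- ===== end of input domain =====

-- B sorts the line's characters once and scans maximal runs of equal characters, checking each
-- run length against the budget, instead of A's per-character loop with repeated line.count
-- rescans; same return value (objective: alternative).


-- ===== PORT A =====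
-- the for-loop over the characters of `line`; `line` and `dictionary` stay fixed
def investigate_letter_go (line : String) (dictionary : List (String × Int)) : List Char → Bool
  | [] => true
  | letter :: rest =>
    if letter = '-' then investigate_letter_go line dictionary rest
    else match (PySem.Dict.mk dictionary).get? (String.ofList [letter]) with
      | none => false                       -- 'letter not in dictionary'
      | some v =>                           -- 'line.count(letter) > dictionary[letter]'
        if (PySem.Str.count line (String.ofList [letter]) : Int) > v then false
        else investigate_letter_go line dictionary rest

def investigate_letter (line : String) (dictionary : List (String × Int)) : Bool :=
  investigate_letter_go line dictionary line.toList

-- ===== PORT B =====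
-- the outer while loop over runs of s; the inner `while j < n and s[j] == s[i]` that advances j
-- over the characters equal to s[i] is the takeWhile/dropWhile split of the remaining list
def investigate_letter_alt_go (dictionary : List (String × Int)) : List Char → Bool
  | [] => true                              -- i = n: fell off the loop, return True
  | c :: rest =>
    let run := rest.takeWhile (fun x => x == c)        -- j - i = 1 + run.length
    if c ≠ '-' then
      match (PySem.Dict.mk dictionary).get? (String.ofList [c]) with
      | none => false                       -- 'ch not in dictionary'
      | some v =>
        if ((1 + run.length : Int) > v) then false     -- 'j - i > dictionary[ch]'
        else investigate_letter_alt_go dictionary (rest.dropWhile (fun x => x == c))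
    else investigate_letter_alt_go dictionary (rest.dropWhile (fun x => x == c))
termination_by l => l.length
decreasing_by
  all_goals exact Nat.lt_succ_of_le (List.length_dropWhile_le _ _)

def investigate_letter_alt (line : String) (dictionary : List (String × Int)) : Bool :=
  -- s = sorted(line)
  investigate_letter_alt_go dictionary (PySem.List.sorted line.toList (fun x => x) false)

-- ===== PRECONDITION & SPEC =====
def Spec_investigate_letter (line : String) (dictionary : List (String × Int)) (out : Bool) : Prop := out = investigate_letter_alt line dictionary
instance (line : String) (dictionary : List (String × Int)) (out : Bool) : Decidable (Spec_investigate_letter line dictionary out) := by unfold Spec_investigate_letter; infer_instance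

-- ===== CLAIM (what is proved, stated in full; the proofs are below) =====
def Claim_equal_investigate_letter : Prop := ∀ (line : String) (dictionary : List (String × Int)), Dom_investigate_letter line dictionary → Spec_investigate_letter line dictionary (investigate_letter line dictionary)

-- ===== LEMMAS AND PROOFS =====

-- Python's s.count(c) for a single character c is the character count.
theorem count_go_single (c : Char) : ∀ (l : List Char) (acc : Nat),
    PySem.Chars.count.go [c] l.length l acc = acc + l.count c
  | [], acc => by simp [PySem.Chars.count.go]
  | h :: t, acc => by
    rw [List.length_cons, PySem.Chars.count.go]
    by_cases hc : h = c
    · simp [List.isPrefixOf, hc, count_go_single c t]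
      omega
    · simp [List.isPrefixOf, hc, Ne.symm hc, count_go_single c t]

theorem count_single (s : List Char) (c : Char) : PySem.Chars.count s [c] = s.count c := by
  simp [PySem.Chars.count, count_go_single]

-- the per-letter test both programs apply, parameterised by the count of the letter
def letterOk (dictionary : List (String × Int)) (cnt : Int) (c : Char) : Bool :=
  match (PySem.Dict.mk dictionary).get? (String.ofList [c]) with
  | none => false
  | some v => decide (cnt ≤ v)

theorem go_eq_all (line : String) (dictionary : List (String × Int)) : ∀ (l : List Char),
    investigate_letter_go line dictionary l
      = l.all (fun c => c == '-' || letterOk dictionary (line.toList.count c) c)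
  | [] => by simp [investigate_letter_go]
  | letter :: rest => by
    rw [investigate_letter_go, List.all_cons]
    by_cases hd : letter = '-'
    · simp [hd, go_eq_all line dictionary rest]
    · simp only [if_neg hd]
      cases hget : (PySem.Dict.mk dictionary).get? (String.ofList [letter]) with
      | none => simp [letterOk, hget, hd]
      | some v =>
        by_cases hle : (line.toList.count letter : Int) ≤ v
        · simp [letterOk, hget, PySem.Str.count, count_single,
                go_eq_all line dictionary rest, hle]
        · have hgt : v < (line.toList.count letter : Int) := lt_of_not_ge hle
          simp [letterOk, hget, hd, PySem.Str.count, count_single, hle, hgt]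

-- a Bool predicate over a list: pointwise-equal-on-members functions give equal `all`
theorem all_congr_mem {l : List Char} {p q : Char → Bool} (h : ∀ x ∈ l, p x = q x) :
    l.all p = l.all q := by
  induction l with
  | nil => rfl
  | cons a t ih =>
    simp only [List.all_cons]
    rw [h a (by simp), ih (fun x hx => h x (by simp [hx]))]

-- `all` over a run-decomposed list: the run's elements all equal its head
theorem all_run (P : Char → Bool) (c : Char) (t r : List Char) (htc : ∀ x ∈ t, x = c) :
    (c :: (t ++ r)).all P = (P c && r.all P) := by
  simp only [List.all_cons, List.all_append, ← Bool.and_assoc]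
  by_cases h : P c = true
  · have : t.all P = true := List.all_eq_true.mpr (fun x hx => (htc x hx) ▸ h)
    rw [h, this]
    simp
  · rw [Bool.eq_false_iff.mpr h]
    simp

-- the run scan on a ≤-sorted list decides the same predicate (run length = count in the list)
theorem altgo_eq_all (dictionary : List (String × Int)) : ∀ (l : List Char),
    l.Pairwise (· ≤ ·) →
    investigate_letter_alt_go dictionary l
      = l.all (fun c => c == '-' || letterOk dictionary (l.count c) c)
  | [], _ => by simp [investigate_letter_alt_go]
  | c :: rest, hp => by
    have hsplit : rest.takeWhile (fun x => x == c) ++ rest.dropWhile (fun x => x == c) = rest :=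
      List.takeWhile_append_dropWhile
    set t := rest.takeWhile (fun x => x == c) with ht
    set r := rest.dropWhile (fun x => x == c) with hr
    have htc : ∀ x ∈ t, x = c := by
      intro x hx
      have := List.mem_takeWhile_imp hx
      simpa using this
    have hrp : r.Pairwise (· ≤ ·) :=
      List.Pairwise.sublist (List.dropWhile_sublist _) hp.of_cons
    have hcr : c ∉ r := by
      intro hcmem
      cases hrcase : r with
      | nil => simp [hrcase] at hcmem
      | cons h tl =>
        have hne : ¬ (h == c) = true := by
          have := List.head?_dropWhile_not (fun x => x == c) rest
          simp [← hr, hrcase] at this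
          simpa using this
        have hhc : h ≠ c := by simpa using hne
        have hhr : h ∈ rest := by
          have : h ∈ r := by simp [hrcase]
          exact (List.dropWhile_sublist _).mem this
        have hch : c ≤ h := (List.pairwise_cons.mp hp).1 h hhr
        have hclt : c < h := lt_of_le_of_ne hch (Ne.symm hhc)
        rcases (by simpa [hrcase] using hcmem : c = h ∨ c ∈ tl) with hc1 | hc2
        · exact absurd hc1.symm hhc
        · have : h ≤ c := (List.pairwise_cons.mp (hrcase ▸ hrp)).1 c hc2
          exact absurd (lt_of_lt_of_le hclt this) (lt_irrefl c)
    have hcount_t : t.count c = t.length :=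
      List.count_eq_length.mpr (fun x hx => by simp [htc x hx])
    have hcount_c : (c :: rest).count c = 1 + t.length := by
      rw [← hsplit]
      simp [List.count_append, hcount_t, List.count_eq_zero.mpr hcr]
      omega
    have hcount_r : ∀ x ∈ r, (c :: rest).count x = r.count x := by
      intro x hx
      have hxc : x ≠ c := fun h => hcr (h ▸ hx)
      rw [← hsplit]
      simp [List.count_cons, List.count_append, Ne.symm hxc,
            List.count_eq_zero.mpr (fun hxt => hxc (htc x hxt))]
    have hlen : r.length < (c :: rest).length :=
      Nat.lt_succ_of_le (List.length_dropWhile_le _ _)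
    have ih := altgo_eq_all dictionary r hrp
    set P : Char → Bool :=
      fun x => x == '-' || letterOk dictionary (((c :: rest).count x : Int)) x with hP
    have hsame : r.all (fun x => x == '-' || letterOk dictionary (r.count x) x) = r.all P := by
      apply all_congr_mem
      intro x hx
      rw [hP]
      simp only
      rw [hcount_r x hx]
    have hall : (c :: rest).all P = (P c && r.all P) := by
      conv_lhs => rw [← hsplit]
      exact all_run P c t r htc
    rw [investigate_letter_alt_go, hall]
    simp only [← ht, ← hr]
    by_cases hd : c = '-'
    · have hPc : P c = true := by rw [hP]; simp [hd]
      simp only [hd]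
      simp only [ne_eq, not_true_eq_false, if_false, Bool.false_eq_true]
      rw [ih, hsame, ← hd, hPc, Bool.true_and]
    · simp only [if_pos (by exact hd : c ≠ '-')]
      cases hget : (PySem.Dict.mk dictionary).get? (String.ofList [c]) with
      | none =>
        have hPc : P c = false := by rw [hP]; simp [letterOk, hget, hd]
        simp [hPc]
      | some v =>
        have hcrest : List.count c rest = t.length := by
          have h := hcount_c
          rw [List.count_cons_self] at h
          omega
        by_cases hle : ((1 + t.length : Int) > v)
        · have hPc : P c = false := by
            rw [hP]
            simp only [letterOk, hget, List.count_cons_self, hcrest]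
            simp [hd]
            push_cast
            omega
          simp [hle, hPc]
        · have hPc : P c = true := by
            rw [hP]
            simp only [letterOk, hget, List.count_cons_self, hcrest]
            have hv : ((t.length : Nat) : Int) < v := by push_cast at hle ⊢; omega
            simp
            exact Or.inr hv
          simp only [hle, if_false, hPc, Bool.true_and]
          rw [ih]
          exact hsame
termination_by l => l.length
decreasing_by exact hlen

-- ===== VERDICT (by name: the statement is the Claim_ definition above) =====
theorem investigate_letter_spec : Claim_equal_investigate_letter := by
  intro line dictionary _
  unfold Spec_investigate_letter
  have hperm : (PySem.List.sorted line.toList (fun x => x) false).Perm line.toList :=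
    PySem.List.sorted_perm _ _ _
  have hsortedp : (PySem.List.sorted line.toList (fun x => x) false).Pairwise (· ≤ ·) := by
    have := PySem.List.sorted_pairwise (xs := line.toList) (key := fun x => x)
    simpa using this
  rw [investigate_letter, go_eq_all, investigate_letter_alt,
      altgo_eq_all dictionary _ hsortedp]
  have hcnt : ∀ c, (PySem.List.sorted line.toList (fun x => x) false).count c
      = line.toList.count c := fun c => hperm.count_eq c
  calc line.toList.all (fun c => c == '-' || letterOk dictionary (line.toList.count c) c)
      = (PySem.List.sorted line.toList (fun x => x) false).all
          (fun c => c == '-' || letterOk dictionary (line.toList.count c) c) :=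
        (by
          apply Bool.coe_iff_coe.mp
          rw [List.all_eq_true, List.all_eq_true]
          exact ⟨fun h x hx => h x (hperm.mem_iff.mp hx),
                 fun h x hx => h x (hperm.mem_iff.mpr hx)⟩)
    _ = (PySem.List.sorted line.toList (fun x => x) false).all
          (fun c => c == '-' || letterOk dictionary
            ((PySem.List.sorted line.toList (fun x => x) false).count c) c) := by
        apply all_congr_mem
        intro x _
        rw [hcnt x]
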